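-- pv_equiv track=rewrite | github.com/Alectriciti/comfyui-adaptiveprompts | py/prompt_repack.py | _is_wildcard_blacklisted
-- ===== SOURCE A (Python) =====
-- def _is_wildcard_blacklisted(wildcard_name: str, patterns) -> bool:
--     name = wildcard_name.lower()
--     for pat in patterns:
--         if not pat:
--             continue
--         if pat.endswith("*"):
--             if name.startswith(pat[:-1]):
--                 return True
--         else:
--             if name == pat:
--                 return True
--     return False
-- ===== SOURCE B (Python) =====
-- def _is_wildcard_blacklisted(wildcard_name: str, patterns) -> bool:
--     # Inverted lookup: build one hash set of the truthy patterns and the set of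
--     # prefix lengths occurring among star patterns; a star pattern 'p*' matches
--     # iff name[:len(p)] + '*' is in the set, so only those lengths are probed.
--     patset = {p for p in patterns if p}
--     star_lens = {len(p) - 1 for p in patterns if p and p.endswith("*")}
--     name = wildcard_name.lower()
--     if name in patset:
--         return True
--     return any(L <= len(name) and name[:L] + "*" in patset for L in star_lens)
-- ===== Notes on version B (the rewrite author's own statement) =====
-- stated objective: alternative
-- what changed: Inverts the iteration: instead of scanning the pattern list and testing each pattern against the name, B builds one hash set of the truthy patterns plus the set of prefix lengths occurring among star patterns, then answers with O(1) set lookups (exact lookup of the lowercased name, and lookup of name[:L]+'*' for each star-pattern length L).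
import Mathlib
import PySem

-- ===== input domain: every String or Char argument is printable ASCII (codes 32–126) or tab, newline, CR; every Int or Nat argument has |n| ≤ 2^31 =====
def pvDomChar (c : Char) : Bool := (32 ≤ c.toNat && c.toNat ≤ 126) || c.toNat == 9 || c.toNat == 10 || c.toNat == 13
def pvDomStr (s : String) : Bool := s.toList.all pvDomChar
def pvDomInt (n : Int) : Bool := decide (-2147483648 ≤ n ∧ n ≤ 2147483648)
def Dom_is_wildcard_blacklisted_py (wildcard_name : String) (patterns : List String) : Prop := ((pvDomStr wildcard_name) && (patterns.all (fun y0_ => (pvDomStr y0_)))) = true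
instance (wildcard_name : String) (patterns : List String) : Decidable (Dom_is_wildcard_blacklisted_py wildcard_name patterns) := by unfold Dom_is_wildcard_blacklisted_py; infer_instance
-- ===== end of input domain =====

-- B inverts the iteration: one set of the truthy patterns, then set lookups of
-- the name and of name[:L] ++ "*" for each star-pattern length L (alternative).

-- ===== PORT A =====
-- the for-loop with early return, as structural recursion over patterns
def pvALoop (name : String) : List String → Bool
  | [] => false
  | pat :: rest =>
    if pat = "" then pvALoop name rest
    else if PySem.Str.endswith pat "*" then
      if PySem.Str.startswith name (PySem.Str.slice pat none (some (-1))) then true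
      else pvALoop name rest
    else
      if name = pat then true else pvALoop name rest

def is_wildcard_blacklisted_py (wildcard_name : String) (patterns : List String) : Bool :=
  let name := PySem.Str.lower wildcard_name
  pvALoop name patterns

-- ===== PORT B =====
def is_wildcard_blacklisted_py_alt (wildcard_name : String) (patterns : List String) : Bool :=
  let patset : PySem.Set String := PySem.Set.ofList (patterns.filter (fun p => p ≠ ""))
  let starLens : PySem.Set Int := PySem.Set.ofList
    ((patterns.filter (fun p => decide (p ≠ "") && PySem.Str.endswith p "*")).map
      (fun p => (PySem.Str.len p : Int) - 1))
  let name := PySem.Str.lower wildcard_name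
  if PySem.Set.contains patset name then true
  else List.any starLens (fun L => decide (L ≤ (PySem.Str.len name : Int)) &&
    PySem.Set.contains patset (PySem.Str.slice name none (some L) ++ "*"))

-- ===== PRECONDITION & SPEC =====
def Spec_is_wildcard_blacklisted_py (wildcard_name : String) (patterns : List String) (out : Bool) : Prop := out = is_wildcard_blacklisted_py_alt wildcard_name patterns
instance (wildcard_name : String) (patterns : List String) (out : Bool) : Decidable (Spec_is_wildcard_blacklisted_py wildcard_name patterns out) := by unfold Spec_is_wildcard_blacklisted_py; infer_instance

-- ===== CLAIM =====
def Claim_equal_is_wildcard_blacklisted_py : Prop := ∀ (wildcard_name : String) (patterns : List String), Dom_is_wildcard_blacklisted_py wildcard_name patterns → Spec_is_wildcard_blacklisted_py wildcard_name patterns (is_wildcard_blacklisted_py wildcard_name patterns)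

-- ===== LEMMAS AND PROOFS =====

-- A's per-pattern test
def pvMatch (name pat : String) : Bool :=
  if pat = "" then false
  else if PySem.Str.endswith pat "*" then
    PySem.Str.startswith name (PySem.Str.slice pat none (some (-1)))
  else name == pat

theorem pvALoop_eq_any (name : String) (pats : List String) :
    pvALoop name pats = pats.any (pvMatch name) := by
  induction pats with
  | nil => rfl
  | cons pat rest ih =>
    simp only [pvALoop, pvMatch, List.any_cons, ← ih]
    split_ifs <;> simp_all

-- per-pattern characterisation: A's test holds iff pat is the name itself or
-- some prefix of name followed by '*'
theorem pvMatch_iff (name pat : String) :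
    pvMatch name pat = true ↔
      pat ≠ "" ∧ (name = pat ∨ ∃ k : ℕ, k ≤ name.toList.length ∧
        String.ofList (name.toList.take k) ++ "*" = pat) := by
  constructor
  · intro h
    unfold pvMatch at h
    split_ifs at h with h0 hstar
    · -- star pattern: name startswith pat[:-1]
      refine ⟨h0, Or.inr ?_⟩
      have hsw : pat.toList.dropLast <+: name.toList := by
        have := (PySem.Chars.startswith_iff (s := name.toList)
          (p := (PySem.Str.slice pat none (some (-1))).toList)).mp (by
            simpa [PySem.Str.startswith] using h)
        simpa [PySem.Str.toList_slice, PySem.List.slice_to_neg_one] using this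
      have hend : ['*'] <:+ pat.toList := by
        have := (PySem.Chars.endswith_iff (s := pat.toList) (p := ['*'])).mp (by
          simpa [PySem.Str.endswith] using hstar)
        simpa using this
      obtain ⟨t, ht⟩ := hend
      refine ⟨pat.toList.dropLast.length, hsw.length_le, ?_⟩
      have htake : name.toList.take pat.toList.dropLast.length = pat.toList.dropLast :=
        (List.prefix_iff_eq_take.mp hsw).symm
      have hdl : pat.toList.dropLast = t := by
        rw [← ht]; exact List.dropLast_concat ..
      have htk : List.take t.length name.toList = t := hdl ▸ htake
      apply String.ext
      simp [htk, ← ht]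
    · exact ⟨h0, Or.inl (by simpa using h)⟩
  · rintro ⟨h0, h | ⟨k, hk, hpk⟩⟩
    · -- name = pat
      subst h
      unfold pvMatch
      by_cases hstar : PySem.Str.endswith name "*" = true
      · have hsw : PySem.Str.startswith name (PySem.Str.slice name none (some (-1))) = true := by
          have : name.toList.dropLast <+: name.toList := List.dropLast_prefix _
          simpa [PySem.Str.startswith, PySem.Str.toList_slice,
            PySem.List.slice_to_neg_one, PySem.Chars.startswith_iff] using this
        rw [if_neg h0, if_pos hstar]
        exact hsw
      · rw [if_neg h0, if_neg hstar]
        simp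
    · -- pat = take k name ++ '*'
      have hpl : pat.toList = name.toList.take k ++ ['*'] := by
        rw [← hpk]; simp
      unfold pvMatch
      have hstar : PySem.Str.endswith pat "*" = true := by
        simp only [PySem.Str.endswith]
        rw [PySem.Chars.endswith_iff]
        simp [hpl]
      have hsw : PySem.Str.startswith name (PySem.Str.slice pat none (some (-1))) = true := by
        simp only [PySem.Str.startswith, PySem.Chars.startswith_iff,
          PySem.Str.toList_slice, PySem.Chars.slice_eq_listSlice,
          PySem.List.slice_to_neg_one, hpl, List.dropLast_concat]
        exact List.take_prefix ..
      rw [if_neg h0, if_pos hstar]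
      exact hsw

-- B unfolded as a proposition
theorem pvB_iff (w : String) (pats : List String) :
    is_wildcard_blacklisted_py_alt w pats = true ↔
      ((PySem.Str.lower w ∈ pats ∧ PySem.Str.lower w ≠ "") ∨
       ∃ k : ℕ, k ≤ (PySem.Str.lower w).toList.length ∧
        (String.ofList ((PySem.Str.lower w).toList.take k) ++ "*") ∈ pats) := by
  unfold is_wildcard_blacklisted_py_alt
  simp only
  set name := PySem.Str.lower w with hname
  have hmem : ∀ s : String,
      PySem.Set.contains (PySem.Set.ofList (pats.filter (fun p => p ≠ ""))) s = true
      ↔ (s ∈ pats ∧ s ≠ "") := by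
    intro s
    rw [PySem.Set.contains_iff, PySem.Set.mem_ofList, List.mem_filter]
    simp
  constructor
  · intro h
    split_ifs at h with hc
    · exact Or.inl ((hmem name).mp hc)
    · rw [List.any_eq_true] at h
      obtain ⟨L, hL, hcond⟩ := h
      rw [Bool.and_eq_true, decide_eq_true_iff] at hcond
      obtain ⟨hLle, hci⟩ := hcond
      -- L is a star-pattern length minus one, hence nonnegative
      rw [PySem.Set.mem_ofList, List.mem_map] at hL
      obtain ⟨p, hpf, hLp⟩ := hL
      rw [List.mem_filter, Bool.and_eq_true, decide_eq_true_iff] at hpf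
      have hL0 : 0 ≤ L := by
        have hplen : 1 ≤ p.toList.length := by
          have : p.toList ≠ [] := fun habs =>
            hpf.2.1 (String.ext (s₂ := "") (by simpa using habs))
          cases hp : p.toList with
          | nil => exact absurd hp this
          | cons a t => simp
        have h2 : PySem.Str.len p = p.toList.length := by simp [PySem.Str.len]
        omega
      refine Or.inr ⟨L.toNat, ?_, ?_⟩
      · have h2 : PySem.Str.len name = name.toList.length := by simp [PySem.Str.len]
        omega
      · have hs : PySem.Str.slice name none (some L) =
            String.ofList (name.toList.take L.toNat) := by
          apply String.ext
          simp [PySem.Str.toList_slice, PySem.List.slice_to _ hL0]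
        rw [hs] at hci
        exact ((hmem _).mp hci).1
  · intro h
    split_ifs with hc
    · rfl
    · rcases h with ⟨hmemn, hne⟩ | ⟨k, hk, hkm⟩
      · exact absurd ((hmem name).mpr ⟨hmemn, hne⟩) (by simpa using hc)
      · rw [List.any_eq_true]
        have hplen : (String.ofList (name.toList.take k) ++ "*").toList
            = name.toList.take k ++ ['*'] := by simp
        refine ⟨(k : Int), ?_, ?_⟩
        · rw [PySem.Set.mem_ofList, List.mem_map]
          refine ⟨String.ofList (name.toList.take k) ++ "*", ?_, ?_⟩
          · rw [List.mem_filter, Bool.and_eq_true, decide_eq_true_iff]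
            refine ⟨hkm, ?_, ?_⟩
            · intro habs
              have : (String.ofList (name.toList.take k) ++ "*").toList = [] := by
                rw [habs]; rfl
              simp at this
            · simp only [PySem.Str.endswith]
              rw [PySem.Chars.endswith_iff]
              simp [hplen]
          · have h3 : (String.ofList (name.toList.take k) ++ "*").toList.length
                = k + 1 := by
              rw [hplen]
              simp only [List.length_append, List.length_take, List.length_cons,
                List.length_nil]
              omega
            have h4 : PySem.Str.len (String.ofList (name.toList.take k) ++ "*")
                = (String.ofList (name.toList.take k) ++ "*").toList.length := by
              simp [PySem.Str.len]
            rw [h4, h3]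
            push_cast
            ring
        · rw [Bool.and_eq_true, decide_eq_true_iff]
          constructor
          · have h2 : PySem.Str.len name = name.toList.length := by simp [PySem.Str.len]
            omega
          · have hs : PySem.Str.slice name none (some (k : Int)) =
                String.ofList (name.toList.take k) := by
              apply String.ext
              simp [PySem.Str.toList_slice, PySem.List.slice_to_natCast]
            rw [hs]
            refine (hmem _).mpr ⟨hkm, ?_⟩
            intro habs
            have : (String.ofList (name.toList.take k) ++ "*").toList = [] := by
              rw [habs]; rfl
            simp at this

-- strings of the form prefix ++ '*' are nonempty; used to line up A and B
theorem pvA_iff (name : String) (pats : List String) :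
    pvALoop name pats = true ↔
      ((name ∈ pats ∧ name ≠ "") ∨ ∃ k : ℕ, k ≤ name.toList.length ∧
        (String.ofList (name.toList.take k) ++ "*") ∈ pats) := by
  rw [pvALoop_eq_any, List.any_eq_true]
  constructor
  · rintro ⟨pat, hpat, hm⟩
    rcases (pvMatch_iff name pat).mp hm with ⟨h0, h | ⟨k, hk, hpk⟩⟩
    · exact Or.inl ⟨h ▸ hpat, h ▸ h0⟩
    · exact Or.inr ⟨k, hk, hpk ▸ hpat⟩
  · rintro (⟨hmem, hne⟩ | ⟨k, hk, hkm⟩)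
    · exact ⟨name, hmem, (pvMatch_iff name name).mpr ⟨hne, Or.inl rfl⟩⟩
    · refine ⟨_, hkm, (pvMatch_iff name _).mpr ⟨?_, Or.inr ⟨k, hk, rfl⟩⟩⟩
      intro habs
      have : (String.ofList (name.toList.take k) ++ "*").toList = [] := by rw [habs]; rfl
      simp at this

-- ===== VERDICT =====
theorem is_wildcard_blacklisted_py_spec : Claim_equal_is_wildcard_blacklisted_py := by
  intro wildcard_name patterns _
  unfold Spec_is_wildcard_blacklisted_py
  rw [Bool.eq_iff_iff, pvB_iff]
  show pvALoop (PySem.Str.lower wildcard_name) patterns = true ↔ _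
  rw [pvA_iff]
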